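-- pv_equiv track=rewrite | github.com/JamesZXie/m2m-processing | main.py | skrrt_eval
-- ===== SOURCE A (Python) =====
-- def skrrt_eval(tf4):
-- # y rotation rn; need more data
--     condition1 = 0
--     condition2 = 0
--     # add more later
--     for val1 in tf4:
--         if val1 > 30000:
--             condition1 = True
--         elif val1 < -30000:
--             condition2 = True
--         if condition1 and condition2 and val1 > 30000:
--             return True
--     return False
-- ===== SOURCE B (Python) =====
-- def skrrt_eval(tf4):
--     xs = list(tf4)
--     idx = next((i for i, v in enumerate(xs) if v < -30000), None)
--     if idx is None:
--         return False
--     return any(v > 30000 for v in xs[idx + 1:])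
-- ===== Notes on version B (the rewrite author's own statement) =====
-- stated objective: simpler
-- what changed: Replaced A's fused single-pass two-flag loop with early return by a two-phase computation: locate the first element < -30000, then test whether any element of the suffix after it exceeds 30000 (A's condition1 flag is redundant since the triggering element is itself positive).
import Mathlib
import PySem

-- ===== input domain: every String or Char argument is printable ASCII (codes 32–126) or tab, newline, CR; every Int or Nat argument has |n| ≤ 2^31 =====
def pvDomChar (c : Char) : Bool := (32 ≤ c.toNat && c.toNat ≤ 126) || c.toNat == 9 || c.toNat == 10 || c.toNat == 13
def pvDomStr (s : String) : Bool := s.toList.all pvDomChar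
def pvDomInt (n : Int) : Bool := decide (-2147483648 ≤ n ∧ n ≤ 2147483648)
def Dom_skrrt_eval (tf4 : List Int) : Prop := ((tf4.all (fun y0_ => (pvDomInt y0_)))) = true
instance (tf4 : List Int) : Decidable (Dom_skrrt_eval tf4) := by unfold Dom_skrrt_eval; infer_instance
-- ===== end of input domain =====

-- B replaces A's fused two-flag scan by locate-first-negative-pivot then scan the suffix (objective: simpler).

-- ===== PORT A =====
-- the loop of A: carries condition1/condition2, early-returns true when the guard fires
def skrrtLoopA (c1 c2 : Bool) : List Int → Bool
  | [] => false
  | v :: rest =>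
    let c1' := if v > 30000 then true else c1
    let c2' := if v > 30000 then c2 else (if v < -30000 then true else c2)
    if c1' && c2' && decide (v > 30000) then true
    else skrrtLoopA c1' c2' rest

def skrrt_eval (tf4 : List Int) : Bool := skrrtLoopA false false tf4

-- ===== PORT B =====
def skrrt_eval_alt (tf4 : List Int) : Bool :=
  match tf4.findIdx? (fun v => decide (v < -30000)) with
  | none => false
  | some i => (tf4.drop (i + 1)).any (fun v => decide (v > 30000))

-- ===== PRECONDITION & SPEC =====
def Spec_skrrt_eval (tf4 : List Int) (out : Bool) : Prop := out = skrrt_eval_alt tf4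
instance (tf4 : List Int) (out : Bool) : Decidable (Spec_skrrt_eval tf4 out) := by unfold Spec_skrrt_eval; infer_instance

-- ===== CLAIM (what is proved, stated in full; the proofs are below) =====
def Claim_equal_skrrt_eval : Prop := ∀ (tf4 : List Int), Dom_skrrt_eval tf4 → Spec_skrrt_eval tf4 (skrrt_eval tf4)

-- ===== LEMMAS AND PROOFS =====

-- prepending an element that is not < -30000 does not change B
theorem skrrt_alt_cons_ge (v : Int) (rest : List Int) (h : ¬ v < -30000) :
    skrrt_eval_alt (v :: rest) = skrrt_eval_alt rest := by
  simp only [skrrt_eval_alt, List.findIdx?_cons, decide_eq_true_eq, if_neg h]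
  cases hf : rest.findIdx? (fun v => decide (v < -30000)) with
  | none => simp
  | some i => simp [List.drop_succ_cons]

-- prepending an element < -30000 makes B scan the whole rest
theorem skrrt_alt_cons_lt (v : Int) (rest : List Int) (h : v < -30000) :
    skrrt_eval_alt (v :: rest) = rest.any (fun v => decide (v > 30000)) := by
  simp [skrrt_eval_alt, List.findIdx?_cons, h]

-- loop invariant: c1 is irrelevant; with c2 set the loop is a suffix scan, otherwise it computes B
theorem skrrtLoopA_eq (l : List Int) : ∀ (c1 c2 : Bool),
    skrrtLoopA c1 c2 l = if c2 then l.any (fun v => decide (v > 30000)) else skrrt_eval_alt l := by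
  induction l with
  | nil => intro c1 c2; cases c2 <;> simp [skrrtLoopA, skrrt_eval_alt]
  | cons v rest ih =>
    intro c1 c2
    by_cases hpos : v > 30000
    · have hneg : ¬ v < -30000 := by omega
      cases c2 with
      | true => simp [skrrtLoopA, hpos]
      | false =>
        simp only [skrrtLoopA, if_pos hpos, if_neg hneg, Bool.and_false, Bool.false_and,
          if_neg (by simp : ¬ (false : Bool) = true)]
        rw [ih true false, if_neg (by simp : ¬ (false : Bool) = true),
            skrrt_alt_cons_ge v rest hneg]
    · by_cases hneg : v < -30000
      · have : skrrtLoopA c1 c2 (v :: rest)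
            = skrrtLoopA (if v > 30000 then true else c1) true rest := by
          simp [skrrtLoopA, hpos, hneg]
        rw [this, ih _ true, if_pos rfl]
        cases c2 with
        | true => simp [List.any_cons, hpos]
        | false => rw [if_neg (by simp), skrrt_alt_cons_lt v rest hneg]
      · have : skrrtLoopA c1 c2 (v :: rest) = skrrtLoopA c1 c2 rest := by
          simp [skrrtLoopA, hpos, hneg]
        rw [this, ih c1 c2]
        cases c2 with
        | true => simp [List.any_cons, hpos]
        | false => rw [if_neg (by simp), if_neg (by simp), skrrt_alt_cons_ge v rest hneg]

-- ===== VERDICT (by name: the statement is the Claim_ definition above) =====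
theorem skrrt_eval_spec : Claim_equal_skrrt_eval := by
  intro tf4 _
  unfold Spec_skrrt_eval skrrt_eval
  rw [skrrtLoopA_eq tf4 false false, if_neg (by simp)]
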